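-- pv_equiv track=rewrite | github.com/miliar/Code_Jam_Webscraper | solutions_python/Problem_155/1012.py | solve
-- ===== SOURCE A (Python) =====
-- def solve(case):
--   """
--   Keep track of how many people are needed so far, num_invites (init to 0).
--   Keep track of people looked at so far, num_present (init to 0).
--   Look at shyness levels from left to right
--   - num_invites += index - num_present
--   """
--   s_max, ppl_by_shyness = case
--   num_invites, num_present = 0, ppl_by_shyness[0]
--   for shyness in range(1, s_max + 1):
--     ppl = ppl_by_shyness[shyness]
--     extra_required = shyness - num_present
--     if extra_required > 0:
--       num_invites += extra_required
--       num_present += extra_required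
--     num_present += ppl
--
--   return str(num_invites)
-- ===== SOURCE B (Python) =====
-- def solve(case):
--     s_max, ppl_by_shyness = case
--     # Stage 1: tabulate (shyness level, people standing before it) pairs.
--     pairs = []
--     p = ppl_by_shyness[0]
--     for k in range(1, s_max + 1):
--         pairs.append((k, p))
--         p += ppl_by_shyness[k]
--
--     def feasible(x):
--         return all(pf + x >= k for (k, pf) in pairs)
--
--     # Stage 2: exponential search for a feasible invite count ...
--     hi = 1
--     while not feasible(hi):
--         hi *= 2
--     # Stage 3: ... then binary search for the least feasible one.
--     lo = 0
--     while lo < hi: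
--         mid = (lo + hi) // 2
--         if feasible(mid):
--             hi = mid
--         else:
--             lo = mid + 1
--     return str(lo)
-- ===== Notes on version B (the rewrite author's own statement) =====
-- stated objective: alternative
-- what changed: B does not simulate the invite top-ups at all: it first tabulates (shyness, prefix-of-people) pairs, then treats 'x invites suffice' as a monotone feasibility predicate and finds the least feasible x by exponential growth followed by binary search.
import Mathlib
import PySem

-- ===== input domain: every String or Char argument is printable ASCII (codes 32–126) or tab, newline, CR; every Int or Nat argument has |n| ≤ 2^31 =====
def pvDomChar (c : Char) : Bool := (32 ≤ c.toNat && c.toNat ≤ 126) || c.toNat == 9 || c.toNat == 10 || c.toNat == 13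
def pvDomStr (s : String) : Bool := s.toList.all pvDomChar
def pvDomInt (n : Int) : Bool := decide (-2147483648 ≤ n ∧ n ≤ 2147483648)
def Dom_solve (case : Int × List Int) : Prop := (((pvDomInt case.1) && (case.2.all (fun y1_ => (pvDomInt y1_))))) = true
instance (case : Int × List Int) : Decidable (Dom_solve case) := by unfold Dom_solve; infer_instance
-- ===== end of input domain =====

-- B drops A's invite simulation: it tabulates (shyness, prefix) pairs, then finds the least
-- feasible invite count by exponential + binary search on a monotone feasibility predicate.

-- ===== PORT A =====
-- A's loop body: state (num_invites, num_present); list indexing is pyGetD, exact under Pre_solve.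
def solveStep (ppl : List Int) (s : Int × Int) (shyness : Int) : Int × Int :=
  let p := PySem.List.pyGetD ppl shyness 0
  let extra := shyness - s.2
  let s := if extra > 0 then (s.1 + extra, s.2 + extra) else s
  (s.1, s.2 + p)

def solve (case : Int × List Int) : String :=
  let st := (PySem.List.pyRange 1 (case.1 + 1) 1).foldl (solveStep case.2)
              (0, PySem.List.pyGetD case.2 0 0)
  PySem.Int.toStr st.1

-- ===== PORT B =====
-- Stage 1 loop body: state (p, pairs); indexing exact under Pre_solve.
def pvBuildStep (ppl : List Int) (s : Int × List (Int × Int)) (k : Int) : Int × List (Int × Int) :=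
  (s.1 + PySem.List.pyGetD ppl k 0, s.2 ++ [(k, s.1)])

-- feasible(x): x invites make everyone stand.
def pvFeasible (pairs : List (Int × Int)) (x : Int) : Bool :=
  pairs.all (fun kp => decide (kp.2 + x ≥ kp.1))

-- Max deficit; used only to size the fuel of the two search loops below.
def pvDmax (pairs : List (Int × Int)) : Int :=
  pairs.foldr (fun kp m => max (kp.1 - kp.2) m) 0

-- Stage 2: while not feasible(hi): hi *= 2.  (fuel only makes the loop total; it is
-- provably sufficient, so the result is the while loop's.)
def pvGrow (pairs : List (Int × Int)) (fuel : Nat) (hi : Int) : Int :=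
  match fuel with
  | 0 => hi
  | n + 1 => if pvFeasible pairs hi then hi else pvGrow pairs n (2 * hi)

-- Stage 3: binary search for the least feasible x.  (same fuel remark.)
def pvBsearch (pairs : List (Int × Int)) (fuel : Nat) (lo hi : Int) : Int :=
  match fuel with
  | 0 => lo
  | n + 1 =>
    if lo < hi then
      let mid := PySem.Int.floordiv (lo + hi) 2
      if pvFeasible pairs mid then pvBsearch pairs n lo mid else pvBsearch pairs n (mid + 1) hi
    else lo

def solve_alt (case : Int × List Int) : String :=
  let st := (PySem.List.pyRange 1 (case.1 + 1) 1).foldl (pvBuildStep case.2)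
              (PySem.List.pyGetD case.2 0 0, [])
  let pairs := st.2
  let hi := pvGrow pairs (pvDmax pairs + 1).toNat 1
  PySem.Int.toStr (pvBsearch pairs (hi - 0).toNat 0 hi)

-- ===== PRECONDITION & SPEC =====
-- Pre_ excludes exactly the inputs where Python A raises IndexError: an empty list
-- (ppl_by_shyness[0]) or s_max reaching past the end of the list.
def Pre_solve (case : Int × List Int) : Prop :=
  case.2 ≠ [] ∧ case.1 < (case.2.length : Int)
instance (case : Int × List Int) : Decidable (Pre_solve case) := by unfold Pre_solve; infer_instance

def pvWitness_solve : (Int × List Int) := (1, [0, 2])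

def Spec_solve (case : Int × List Int) (out : String) : Prop := out = solve_alt case
instance (case : Int × List Int) (out : String) : Decidable (Spec_solve case out) := by unfold Spec_solve; infer_instance

-- ===== CLAIM =====
def Claim_equal_solve : Prop := ∀ (case : Int × List Int), Dom_solve case → Pre_solve case → Spec_solve case (solve case)

-- ===== LEMMAS AND PROOFS =====

-- Abstract form of A's loop: a running max of deficits over the running prefix.
def pvMaxStep (ppl : List Int) (s : Int × Int) (k : Int) : Int × Int :=
  (max s.1 (k - s.2), s.2 + PySem.List.pyGetD ppl k 0)

lemma A_step (ppl : List Int) (inv p k : Int) :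
    solveStep ppl (inv, p + inv) k =
      ((pvMaxStep ppl (inv, p) k).1, (pvMaxStep ppl (inv, p) k).2 + (pvMaxStep ppl (inv, p) k).1) := by
  simp only [solveStep, pvMaxStep]
  by_cases h : k - (p + inv) > 0
  · rw [if_pos h]
    have : max inv (k - p) = k - p := by omega
    rw [this]; simp only [Prod.mk.injEq]; constructor <;> ring
  · rw [if_neg h]
    have : max inv (k - p) = inv := by omega
    rw [this]; simp only [Prod.mk.injEq]; exact ⟨trivial, by ring⟩

lemma A_fold (ppl : List Int) (js : List Int) : ∀ (inv p : Int),
    List.foldl (solveStep ppl) (inv, p + inv) js =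
      ((List.foldl (pvMaxStep ppl) (inv, p) js).1,
       (List.foldl (pvMaxStep ppl) (inv, p) js).2 + (List.foldl (pvMaxStep ppl) (inv, p) js).1) := by
  induction js with
  | nil => intro inv p; rfl
  | cons j js ih =>
    intro inv p
    simp only [List.foldl_cons, A_step]
    exact ih _ _

-- The pairs B builds, in recursive form.
def pvPairsAux (ppl : List Int) : Int → List Int → List (Int × Int)
  | _, [] => []
  | p, k :: js => (k, p) :: pvPairsAux ppl (p + PySem.List.pyGetD ppl k 0) js

lemma build_snd (ppl : List Int) (js : List Int) : ∀ (p : Int) (acc : List (Int × Int)),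
    (List.foldl (pvBuildStep ppl) (p, acc) js).2 = acc ++ pvPairsAux ppl p js := by
  induction js with
  | nil => intro p acc; simp [pvPairsAux]
  | cons j js ih =>
    intro p acc
    simp only [List.foldl_cons, pvBuildStep, pvPairsAux]
    rw [ih]
    simp

lemma foldr_max_max (l : List (Int × Int)) (x i : Int) :
    List.foldr (fun kp m => max (kp.1 - kp.2) m) (max x i) l =
      max x (List.foldr (fun kp m => max (kp.1 - kp.2) m) i l) := by
  induction l with
  | nil => rfl
  | cons kp t ih => simp only [List.foldr_cons, ih]; omega

-- A's running max equals the max of deficits over B's pairs.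
lemma maxfold_eq_pairs (ppl : List Int) (js : List Int) : ∀ (inv p : Int),
    (List.foldl (pvMaxStep ppl) (inv, p) js).1 =
      List.foldr (fun kp m => max (kp.1 - kp.2) m) inv (pvPairsAux ppl p js) := by
  induction js with
  | nil => intro inv p; rfl
  | cons j js ih =>
    intro inv p
    simp only [List.foldl_cons, pvMaxStep, pvPairsAux, List.foldr_cons]
    rw [ih, max_comm inv (j - p), foldr_max_max]

lemma pvDmax_nonneg (pairs : List (Int × Int)) : 0 ≤ pvDmax pairs := by
  induction pairs with
  | nil => simp [pvDmax]
  | cons kp t ih => simp only [pvDmax, List.foldr_cons] at *; omega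

lemma pvFeasible_iff (pairs : List (Int × Int)) (x : Int) (hx : 0 ≤ x) :
    pvFeasible pairs x = true ↔ pvDmax pairs ≤ x := by
  induction pairs with
  | nil => simp [pvFeasible, pvDmax, hx]
  | cons kp t ih =>
    simp only [pvFeasible, List.all_cons, Bool.and_eq_true, decide_eq_true_eq] at *
    simp only [pvDmax, List.foldr_cons] at *
    constructor
    · rintro ⟨h1, h2⟩; have := ih.mp h2; omega
    · intro h; exact ⟨by omega, ih.mpr (by omega)⟩

lemma pvGrow_spec (pairs : List (Int × Int)) : ∀ (fuel : Nat) (hi : Int),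
    0 < hi → pvDmax pairs < hi + fuel →
    pvDmax pairs ≤ pvGrow pairs fuel hi ∧ 0 < pvGrow pairs fuel hi := by
  intro fuel
  induction fuel with
  | zero =>
    intro hi h0 h1
    simp only [pvGrow]
    omega
  | succ n ih =>
    intro hi h0 h1
    rw [pvGrow]
    split_ifs with hf
    · exact ⟨(pvFeasible_iff pairs hi (by omega)).mp hf, h0⟩
    · have hlt : ¬ pvDmax pairs ≤ hi := fun hc =>
        hf ((pvFeasible_iff pairs hi (by omega)).mpr hc)
      exact ih (2 * hi) (by omega) (by omega)

lemma pvBsearch_eq (pairs : List (Int × Int)) : ∀ (fuel : Nat) (lo hi : Int),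
    (hi - lo).toNat ≤ fuel → 0 ≤ lo → lo ≤ pvDmax pairs → pvDmax pairs ≤ hi →
    pvBsearch pairs fuel lo hi = pvDmax pairs := by
  intro fuel
  induction fuel with
  | zero =>
    intro lo hi hn h0 h1 h2
    simp only [pvBsearch]
    omega
  | succ n ih =>
    intro lo hi hn h0 h1 h2
    rw [pvBsearch]
    by_cases hlt : lo < hi
    · rw [if_pos hlt]
      show (if pvFeasible pairs (PySem.Int.floordiv (lo + hi) 2) = true then
              pvBsearch pairs n lo (PySem.Int.floordiv (lo + hi) 2)
            else pvBsearch pairs n (PySem.Int.floordiv (lo + hi) 2 + 1) hi) = pvDmax pairs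
      have hb := PySem.Int.floordiv_two_mid_bounds (lo := lo) (hi := hi) (by omega)
      have hmlt : PySem.Int.floordiv (lo + hi) 2 < hi := by
        rw [PySem.Int.floordiv_lt_iff_lt_mul (by omega)]; omega
      split_ifs with hf
      · have hd := (pvFeasible_iff pairs _ (by omega)).mp hf
        exact ih lo _ (by omega) h0 h1 hd
      · have hd : ¬ pvDmax pairs ≤ PySem.Int.floordiv (lo + hi) 2 := fun hc =>
          hf ((pvFeasible_iff pairs _ (by omega)).mpr hc)
        exact ih _ hi (by omega) (by omega) (by omega) h2
    · rw [if_neg hlt]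
      omega

-- ===== VERDICT =====
theorem solve_spec : Claim_equal_solve := by
  intro case _ _
  unfold Spec_solve solve solve_alt
  simp only []
  have hA := A_fold case.2 (PySem.List.pyRange 1 (case.1 + 1) 1) 0 (PySem.List.pyGetD case.2 0 0)
  rw [add_zero] at hA
  rw [hA]
  have hB := build_snd case.2 (PySem.List.pyRange 1 (case.1 + 1) 1) (PySem.List.pyGetD case.2 0 0) []
  rw [List.nil_append] at hB
  rw [hB]
  set pairs := pvPairsAux case.2 (PySem.List.pyGetD case.2 0 0) (PySem.List.pyRange 1 (case.1 + 1) 1) with hp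
  have hmax := maxfold_eq_pairs case.2 (PySem.List.pyRange 1 (case.1 + 1) 1) 0 (PySem.List.pyGetD case.2 0 0)
  have hg := pvGrow_spec pairs (pvDmax pairs + 1).toNat 1 (by omega)
               (by have := pvDmax_nonneg pairs; omega)
  have hbs := pvBsearch_eq pairs (pvGrow pairs (pvDmax pairs + 1).toNat 1 - 0).toNat 0 _
               (by omega) le_rfl (pvDmax_nonneg pairs) hg.1
  rw [hbs, hmax, ← hp]
  rfl
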